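-- pv_equiv track=rewrite | github.com/paradoxial-composition/python-react-component-tree-generator | react-component-tree-generator.py | generate_markdown_tree
-- ===== SOURCE A (Python) =====
-- def generate_markdown_tree(graph, node, indent=0, visited=None):
--     """
--     Recursively generate a markdown nested list for the tree.
--     'visited' helps avoid infinite loops if there are cycles.
--     """
--     if visited is None:
--         visited = set()
--     md = "  " * indent + f"- {node}\n"
--     if node in visited:
--         return md
--     visited.add(node)
--     for child in sorted(graph.get(node, [])):
--         md += generate_markdown_tree(graph, child, indent + 1, visited.copy())
--     return md
-- ===== SOURCE B (Python) =====
-- def generate_markdown_tree(graph, node, indent=0, visited=None):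
--     """Iterative re-implementation: explicit LIFO stack of (node, depth, visited)
--     frames instead of recursion; children pushed in reverse-sorted order so they
--     are popped in sorted order. Builds the pieces in a list and joins once."""
--     base = set() if visited is None else visited
--     out = []
--     stack = [(node, indent, base)]
--     while stack:
--         n, d, vis = stack.pop()
--         out.append("  " * d + f"- {n}\n")
--         if n in vis:
--             continue
--         vis = vis | {n}
--         for c in sorted(graph.get(n, []), reverse=True):
--             stack.append((c, d + 1, vis))
--     return "".join(out)
-- ===== Notes on version B (the rewrite author's own statement) =====
-- stated objective: alternative
-- what changed: Replaced the recursive tree walk by an iterative explicit LIFO stack of (node, depth, visited) frames, pushing children in reverse-sorted order and joining the collected pieces once at the end.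
import Mathlib
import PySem

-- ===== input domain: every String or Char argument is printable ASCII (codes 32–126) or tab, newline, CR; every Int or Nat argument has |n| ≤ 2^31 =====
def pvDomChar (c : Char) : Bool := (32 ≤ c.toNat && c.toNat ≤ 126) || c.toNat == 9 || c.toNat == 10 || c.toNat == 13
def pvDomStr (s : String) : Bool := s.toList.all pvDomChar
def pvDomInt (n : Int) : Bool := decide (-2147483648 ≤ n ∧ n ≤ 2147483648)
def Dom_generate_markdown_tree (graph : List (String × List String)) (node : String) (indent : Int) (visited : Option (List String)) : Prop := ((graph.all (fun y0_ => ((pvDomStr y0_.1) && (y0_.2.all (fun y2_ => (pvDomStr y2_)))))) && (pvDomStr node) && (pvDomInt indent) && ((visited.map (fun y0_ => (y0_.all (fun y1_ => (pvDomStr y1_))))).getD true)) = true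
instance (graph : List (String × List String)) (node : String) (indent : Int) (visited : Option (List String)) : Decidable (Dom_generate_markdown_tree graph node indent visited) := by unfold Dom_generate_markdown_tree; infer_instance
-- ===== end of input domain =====

-- B replaces A's recursion by an explicit LIFO stack of (node, depth, visited) frames (children
-- pushed in reverse-sorted order, pieces joined once); return values agree everywhere. Note: A
-- mutates a caller-supplied `visited` set in place (visited.add), B does not — the equivalence
-- claimed here is about the return value only.

-- the markdown line '  '*indent + f"- {node}\n", as both Pythons build it literally
def pvMd (indent : Int) (node : String) : List Char :=
  PySem.List.pyRepeat [' ', ' '] indent ++ ('-' :: ' ' :: (node.toList ++ ['\n']))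

-- termination-measure helpers (cited only by the ports' decreasing_by)
def pvCnt (graph : List (String × List String)) (v : List String) : Nat :=
  ((graph.map Prod.fst).filter (fun k => !v.contains k)).length

def pvW (graph : List (String × List String)) : Nat :=
  (graph.map (fun p => p.2.length)).foldr Nat.max 0 + 2

def pvMu (graph : List (String × List String)) (n : String) (v : List String) : Nat :=
  pvCnt graph v * 2 + (if v.contains n then 0 else 1)

def pvPhi (graph : List (String × List String)) (f : String × Int × List String) : Nat :=
  pvW graph ^ pvMu graph f.1 f.2.2

theorem pv_contains_add_of (v : List String) (n x : String)
    (h : (PySem.Set.add v n).contains x = false) : v.contains x = false := by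
  have h' : x ∉ PySem.Set.add v n := by simpa using h
  have hx : x ∉ v := fun hm => h' ((PySem.Set.mem_add v n x).mpr (Or.inl hm))
  simpa using hx

theorem pv_filter_length_mono (l : List String) (p q : String → Bool)
    (h : ∀ x, p x = true → q x = true) : (l.filter p).length ≤ (l.filter q).length := by
  induction l with
  | nil => simp
  | cons a t ih =>
    simp only [List.filter_cons]
    by_cases ha : p a = true
    · rw [if_pos ha, if_pos (h a ha)]
      simpa using ih
    · rw [if_neg ha]
      cases hq : q a
      · rw [if_neg (by simp [hq])]; exact ih
      · rw [if_pos rfl]; simp only [List.length_cons]; omega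

theorem pvCnt_add_le (g : List (String × List String)) (v : List String) (n : String) :
    pvCnt g (PySem.Set.add v n) ≤ pvCnt g v := by
  apply pv_filter_length_mono
  intro x hx
  simp only [Bool.not_eq_eq_eq_not, Bool.not_true] at hx ⊢
  exact pv_contains_add_of v n x hx

theorem pv_filter_add_lt (l : List String) (v : List String) (n : String)
    (hk : n ∈ l) (hv : v.contains n = false) :
    (l.filter (fun k => !(PySem.Set.add v n).contains k)).length
      < (l.filter (fun k => !v.contains k)).length := by
  induction l with
  | nil => simp at hk
  | cons a t ih =>
    simp only [List.filter_cons]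
    rcases List.mem_cons.mp hk with h1 | hmem
    · subst h1
      have hadd : (PySem.Set.add v n).contains n = true :=
        List.contains_iff_mem.mpr ((PySem.Set.mem_add v n n).mpr (Or.inr rfl))
      rw [hadd]
      have hnv : n ∉ v := by simpa using hv
      rw [if_neg (by simp), if_pos (by simp [hnv])]
      simp only [List.length_cons]
      have hle : (t.filter (fun k => !(PySem.Set.add v n).contains k)).length
          ≤ (t.filter (fun k => !v.contains k)).length := by
        apply pv_filter_length_mono
        intro x hx
        simp only [Bool.not_eq_eq_eq_not, Bool.not_true] at hx ⊢
        exact pv_contains_add_of v n x hx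
      omega
    · have h := ih hmem
      by_cases hc : ((!(PySem.Set.add v n).contains a) : Bool) = true
      · have hc' : ((!v.contains a) : Bool) = true := by
          simp only [Bool.not_eq_eq_eq_not, Bool.not_true] at hc ⊢
          exact pv_contains_add_of v n a hc
        rw [if_pos hc, if_pos hc']
        simp only [List.length_cons]; omega
      · rw [if_neg hc]
        cases hc2 : ((!v.contains a) : Bool)
        · rw [if_neg (by simp [hc2])]; exact h
        · rw [if_pos rfl]; simp only [List.length_cons]; omega

theorem pvCnt_add_lt (g : List (String × List String)) (v : List String) (n : String)
    (hk : n ∈ g.map Prod.fst) (hv : v.contains n = false) :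
    pvCnt g (PySem.Set.add v n) < pvCnt g v :=
  pv_filter_add_lt (g.map Prod.fst) v n hk hv

theorem pv_key_of_getD_ne_nil (g : List (String × List String)) (n : String)
    (h : (PySem.Dict.mk g).getD n [] ≠ []) : n ∈ g.map Prod.fst := by
  by_contra hn
  apply h
  apply PySem.Dict.getD_of_not_contains
  rw [← Bool.not_eq_true, PySem.Dict.contains_iff_mem_keys]
  simpa [PySem.Dict.keys_mk] using hn

theorem pv_le_foldr_max (l : List Nat) (x : Nat) (h : x ∈ l) : x ≤ l.foldr Nat.max 0 := by
  induction l with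
  | nil => simp at h
  | cons a t ih =>
    rcases List.mem_cons.mp h with rfl | hm
    · exact le_max_left _ _
    · exact le_trans (ih hm) (le_max_right _ _)

theorem pv_getD_mem (g : List (String × List String)) (n : String)
    (h : (PySem.Dict.mk g).getD n [] ≠ []) : ∃ p ∈ g, (PySem.Dict.mk g).getD n [] = p.2 := by
  induction g with
  | nil => exact absurd rfl h
  | cons a t ih =>
    obtain ⟨k, vv⟩ := a
    rw [PySem.Dict.getD_eq_get?_getD, PySem.Dict.get?_mk_cons] at h
    by_cases he : (k == n) = true
    · rw [if_pos he] at h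
      refine ⟨(k, vv), List.mem_cons_self .., ?_⟩
      rw [PySem.Dict.getD_eq_get?_getD, PySem.Dict.get?_mk_cons, if_pos he]
      rfl
    · rw [if_neg he, ← PySem.Dict.getD_eq_get?_getD] at h
      rcases ih h with ⟨p, hp, hpe⟩
      refine ⟨p, List.mem_cons_of_mem _ hp, ?_⟩
      rw [PySem.Dict.getD_eq_get?_getD, PySem.Dict.get?_mk_cons, if_neg he,
        ← PySem.Dict.getD_eq_get?_getD]
      exact hpe

theorem pv_getD_len_le (g : List (String × List String)) (n : String) :
    ((PySem.Dict.mk g).getD n []).length ≤ pvW g - 2 := by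
  by_cases h : (PySem.Dict.mk g).getD n [] = []
  · simp [h]
  · rcases pv_getD_mem g n h with ⟨p, hp, hpe⟩
    rw [hpe]
    have h1 : p.2.length ∈ g.map (fun p => p.2.length) := List.mem_map_of_mem hp
    have h2 := pv_le_foldr_max _ _ h1
    unfold pvW; omega

-- ===== PORT A =====
mutual
def pvGoA (graph : List (String × List String)) (node : String) (indent : Int)
    (visited : List String) : List Char :=
  let md := pvMd indent node
  if visited.contains node then md
  else
    pvGoListA graph
      (PySem.List.sorted ((PySem.Dict.mk graph).getD node []) (fun x => x) false)
      (indent + 1) (PySem.Set.add visited node) md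
termination_by (pvMu graph node visited, 0)
decreasing_by
  · apply Prod.Lex.left
    rename_i hni
    have hnc : visited.contains node = false := by simpa using hni
    have e1 : pvMu graph node visited = pvCnt graph visited * 2 + 1 := by
      unfold pvMu
      rw [hnc]
      simp
    rw [e1]
    by_cases hnil :
        PySem.List.sorted ((PySem.Dict.mk graph).getD node []) (fun x => x) false = []
    · rw [hnil]
      have hle := pvCnt_add_le graph visited node
      simp only [List.isEmpty_nil]
      simp only [if_true]
      omega
    · have hse : (PySem.List.sorted ((PySem.Dict.mk graph).getD node [])
          (fun x => x) false).isEmpty = false := by simpa using hnil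
      rw [hse, if_neg (by simp)]
      have hne : (PySem.Dict.mk graph).getD node [] ≠ [] := by
        intro hcc
        exact hnil (by rw [hcc]; rfl)
      have hlt := pvCnt_add_lt graph visited node (pv_key_of_getD_ne_nil graph node hne) hnc
      omega

def pvGoListA (graph : List (String × List String)) (cs : List String) (indent : Int)
    (visited : List String) (md : List Char) : List Char :=
  match cs with
  | [] => md
  | c :: rest => pvGoListA graph rest indent visited (md ++ pvGoA graph c indent visited)
termination_by (pvCnt graph visited * 2 + (if cs.isEmpty then 0 else 2), cs.length)
decreasing_by
  · apply Prod.Lex.left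
    have hce : ((c :: rest : List String)).isEmpty = false := rfl
    rw [hce, if_neg (by simp)]
    unfold pvMu
    split <;> omega
  · by_cases hr : rest = []
    · apply Prod.Lex.left
      subst hr
      simp
    · have h1 : (rest : List String).isEmpty = false := by simpa using hr
      have h2 : ((c :: rest : List String)).isEmpty = false := rfl
      rw [h1, h2]
      apply Prod.Lex.right
      simp
end

def generate_markdown_tree (graph : List (String × List String)) (node : String)
    (indent : Int) (visited : Option (List String)) : String :=
  let v := match visited with
    | none => PySem.Set.empty
    | some v => v
  String.ofList (pvGoA graph node indent v)

-- ===== PORT B =====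
theorem pv_foldl_cons {α β : Type} (l : List α) (f : α → β) (rest : List β) :
    l.foldl (fun st c => f c :: st) rest = (l.map f).reverse ++ rest := by
  induction l generalizing rest with
  | nil => simp
  | cons a t ih => simp [ih]

theorem pv_push_sum_lt (g : List (String × List String)) (n : String) (d : Int)
    (vis : List String) (hn : vis.contains n = false) :
    (((PySem.List.sorted ((PySem.Dict.mk g).getD n []) (fun x => x) true).map
        (fun c => (c, d + 1, PySem.Set.union vis [n]))).map (pvPhi g)).sum
      < pvPhi g (n, d, vis) := by
  have hW : 2 ≤ pvW g := by unfold pvW; omega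
  have hWpos : 0 < pvW g := by omega
  have hn' : n ∉ vis := by simpa using hn
  have hphi : pvPhi g (n, d, vis) = pvW g ^ (pvCnt g vis * 2 + 1) := by
    unfold pvPhi pvMu
    simp [hn']
  by_cases hnil :
      PySem.List.sorted ((PySem.Dict.mk g).getD n []) (fun x => x) true = []
  · rw [hnil, hphi]
    simpa using Nat.pow_pos hWpos
  · have hne : (PySem.Dict.mk g).getD n [] ≠ [] := by
      intro hcc
      exact hnil (by rw [hcc]; rfl)
    have hkey := pv_key_of_getD_ne_nil g n hne
    have hC : pvCnt g (PySem.Set.add vis n) < pvCnt g vis := pvCnt_add_lt g vis n hkey hn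
    set C := pvCnt g vis with hCdef
    set C' := pvCnt g (PySem.Set.add vis n) with hC'def
    have hbound : ∀ x ∈ ((PySem.List.sorted ((PySem.Dict.mk g).getD n []) (fun x => x) true).map
        (fun c => (c, d + 1, PySem.Set.union vis [n]))).map (pvPhi g),
        x ≤ pvW g ^ (C' * 2 + 1) := by
      intro x hx
      simp only [List.map_map, List.mem_map] at hx
      rcases hx with ⟨c, _, rfl⟩
      show pvPhi g (c, d + 1, PySem.Set.union vis [n]) ≤ _
      have hu : PySem.Set.union vis [n] = PySem.Set.add vis n := rfl
      unfold pvPhi pvMu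
      dsimp only
      rw [hu]
      apply Nat.pow_le_pow_right (by omega)
      rw [← hC'def]
      split <;> omega
    have hsum := List.sum_le_card_nsmul _ _ hbound
    simp only [List.length_map, PySem.List.length_sorted, smul_eq_mul] at hsum
    have hlen : ((PySem.Dict.mk g).getD n []).length ≤ pvW g - 2 := pv_getD_len_le g n
    have hX : 0 < pvW g ^ (C * 2 - 1) := Nat.pow_pos hWpos
    calc (((PySem.List.sorted ((PySem.Dict.mk g).getD n []) (fun x => x) true).map
            (fun c => (c, d + 1, PySem.Set.union vis [n]))).map (pvPhi g)).sum
        ≤ ((PySem.Dict.mk g).getD n []).length * pvW g ^ (C' * 2 + 1) := hsum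
      _ ≤ (pvW g - 2) * pvW g ^ (C * 2 - 1) := by
          apply Nat.mul_le_mul hlen
          exact Nat.pow_le_pow_right (by omega) (by omega)
      _ < pvW g * pvW g ^ (C * 2 - 1) := by
          exact mul_lt_mul_of_pos_right (by omega) hX
      _ = pvW g ^ (C * 2 - 1 + 1) := by rw [Nat.pow_succ]; ring
      _ ≤ pvW g ^ (C * 2 + 1) := Nat.pow_le_pow_right (by omega) (by omega)
      _ = pvPhi g (n, d, vis) := by rw [hphi]

def pvRunB (graph : List (String × List String)) (stack : List (String × Int × List String))
    (out : List Char) : List Char :=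
  match stack with
  | [] => out
  | (n, d, vis) :: rest =>
    let out' := out ++ pvMd d n
    if vis.contains n then pvRunB graph rest out'
    else
      let vis' := PySem.Set.union vis [n]
      pvRunB graph
        ((PySem.List.sorted ((PySem.Dict.mk graph).getD n []) (fun x => x) true).foldl
          (fun st c => (c, d + 1, vis') :: st) rest)
        out'
termination_by (stack.map (pvPhi graph)).sum
decreasing_by
  · have : 0 < pvPhi graph (n, d, vis) := by
      unfold pvPhi
      exact Nat.pow_pos (by unfold pvW; omega)
    simp only [List.map_cons, List.sum_cons]
    omega
  · rename_i hni
    rw [pv_foldl_cons]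
    simp only [List.map_cons, List.sum_cons, List.map_append, List.sum_append,
      List.map_reverse, List.sum_reverse, List.map_map]
    have := pv_push_sum_lt graph n d vis (by simpa using hni)
    simp only [List.map_map] at this
    omega

def generate_markdown_tree_alt (graph : List (String × List String)) (node : String)
    (indent : Int) (visited : Option (List String)) : String :=
  let base := match visited with
    | none => PySem.Set.empty
    | some v => v
  String.ofList (pvRunB graph [(node, indent, base)] [])

-- ===== PRECONDITION & SPEC =====
def Spec_generate_markdown_tree (graph : List (String × List String)) (node : String) (indent : Int) (visited : Option (List String)) (out : String) : Prop := out = generate_markdown_tree_alt graph node indent visited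
instance (graph : List (String × List String)) (node : String) (indent : Int) (visited : Option (List String)) (out : String) : Decidable (Spec_generate_markdown_tree graph node indent visited out) := by unfold Spec_generate_markdown_tree; infer_instance

-- ===== CLAIM (what is proved, stated in full; the proofs are below) =====
def Claim_equal_generate_markdown_tree : Prop := ∀ (graph : List (String × List String)) (node : String) (indent : Int) (visited : Option (List String)), Dom_generate_markdown_tree graph node indent visited → Spec_generate_markdown_tree graph node indent visited (generate_markdown_tree graph node indent visited)

-- ===== LEMMAS AND PROOFS =====

theorem pvGoA_of_contains (g : List (String × List String)) (n : String) (d : Int)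
    (vis : List String) (hc : vis.contains n = true) : pvGoA g n d vis = pvMd d n := by
  have hc' : n ∈ vis := List.contains_iff_mem.mp hc
  rw [pvGoA]
  simp [hc']

theorem pvGoA_of_not_contains (g : List (String × List String)) (n : String) (d : Int)
    (vis : List String) (hc : vis.contains n = false) :
    pvGoA g n d vis = pvGoListA g
      (PySem.List.sorted ((PySem.Dict.mk g).getD n []) (fun x => x) false)
      (d + 1) (PySem.Set.add vis n) (pvMd d n) := by
  have hc' : n ∉ vis := by simpa using hc
  rw [pvGoA]
  simp [hc']

theorem pvGoListA_concat (g : List (String × List String)) (ind : Int) (v : List String) :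
    ∀ (cs : List String) (md : List Char),
      pvGoListA g cs ind v md = md ++ (cs.map (fun c => pvGoA g c ind v)).flatten := by
  intro cs
  induction cs with
  | nil => intro md; rw [pvGoListA]; simp
  | cons c rest ih =>
    intro md
    rw [pvGoListA, ih]
    simp

theorem pv_sorted_rev (xs : List String) :
    (PySem.List.sorted xs (fun x => x) true).reverse = PySem.List.sorted xs (fun x => x) false := by
  have hperm : ((PySem.List.sorted xs (fun x => x) true).reverse).Perm
      (PySem.List.sorted xs (fun x => x) false) :=
    ((PySem.List.sorted xs (fun x => x) true).reverse_perm.trans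
      (PySem.List.sorted_perm ..)).trans (PySem.List.sorted_perm ..).symm
  have h1 : ((PySem.List.sorted xs (fun x => x) true).reverse).Pairwise (· ≤ ·) :=
    List.pairwise_reverse.mpr (PySem.List.sorted_pairwise_rev ..)
  have h2 : (PySem.List.sorted xs (fun x => x) false).Pairwise (· ≤ ·) :=
    PySem.List.sorted_pairwise ..
  exact hperm.eq_of_pairwise (fun a b _ _ hab hba => le_antisymm hab hba) h1 h2

theorem pv_run_visited (g : List (String × List String)) (n : String) (d : Int)
    (vis : List String) (rest : List (String × Int × List String)) (out : List Char)
    (hc : vis.contains n = true) :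
    pvRunB g ((n, d, vis) :: rest) out = pvRunB g rest (out ++ pvGoA g n d vis) := by
  have hc' : n ∈ vis := List.contains_iff_mem.mp hc
  rw [pvRunB, pvGoA_of_contains g n d vis hc]
  simp [hc']

theorem pv_main (g : List (String × List String)) :
    ∀ (N : Nat) (n : String) (vis : List String), pvMu g n vis ≤ N →
      ∀ (d : Int) (rest : List (String × Int × List String)) (out : List Char),
        pvRunB g ((n, d, vis) :: rest) out = pvRunB g rest (out ++ pvGoA g n d vis) := by
  intro N
  induction N with
  | zero =>
    intro n vis h d rest out
    cases hc : vis.contains n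
    · exfalso
      unfold pvMu at h
      rw [hc] at h
      simp at h
    · exact pv_run_visited g n d vis rest out hc
  | succ N ih =>
    intro n vis h d rest out
    cases hc : vis.contains n
    case true => exact pv_run_visited g n d vis rest out hc
    case false =>
      have hrw : pvRunB g ((n, d, vis) :: rest) out =
          pvRunB g (((PySem.List.sorted ((PySem.Dict.mk g).getD n []) (fun x => x) false).map
              (fun c => (c, d + 1, PySem.Set.add vis n))) ++ rest) (out ++ pvMd d n) := by
        rw [pvRunB]
        simp only [hc, Bool.false_eq_true, if_false]
        rw [pv_foldl_cons]
        rw [← List.map_reverse, pv_sorted_rev]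
        rfl
      rw [hrw]
      set ss := PySem.List.sorted ((PySem.Dict.mk g).getD n []) (fun x => x) false with hss
      have hall : ∀ c ∈ ss, pvMu g c (PySem.Set.add vis n) ≤ N := by
        intro c hcs
        have hne : (PySem.Dict.mk g).getD n [] ≠ [] := by
          intro hnil
          rw [hss, hnil] at hcs
          simp [PySem.List.sorted_eq_nil_iff] at hcs
        have hkey := pv_key_of_getD_ne_nil g n hne
        have hcl := pvCnt_add_lt g vis n hkey hc
        have hmu : pvMu g n vis = pvCnt g vis * 2 + 1 := by
          unfold pvMu
          rw [hc]
          simp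
        unfold pvMu
        split <;> omega
      have hframes : ∀ (cs : List String), (∀ c ∈ cs, pvMu g c (PySem.Set.add vis n) ≤ N) →
          ∀ (rest' : List (String × Int × List String)) (out' : List Char),
            pvRunB g ((cs.map (fun c => (c, d + 1, PySem.Set.add vis n))) ++ rest') out' =
              pvRunB g rest'
                (out' ++ (cs.map (fun c => pvGoA g c (d + 1) (PySem.Set.add vis n))).flatten) := by
        intro cs
        induction cs with
        | nil => intro _ rest' out'; simp
        | cons c cr ihc =>
          intro hall' rest' out'
          simp only [List.map_cons, List.cons_append]
          rw [ih c (PySem.Set.add vis n) (hall' c (List.mem_cons_self ..)) (d + 1) _ out']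
          rw [ihc (fun x hx => hall' x (List.mem_cons_of_mem _ hx))]
          simp
      rw [hframes ss hall rest (out ++ pvMd d n)]
      rw [pvGoA_of_not_contains g n d vis hc, pvGoListA_concat, ← hss]
      simp

-- ===== VERDICT (by name: the statement is the Claim_ definition above) =====
theorem generate_markdown_tree_spec : Claim_equal_generate_markdown_tree := by
  intro graph node indent visited _
  unfold Spec_generate_markdown_tree generate_markdown_tree generate_markdown_tree_alt
  cases visited <;>
  · simp only []
    rw [pv_main graph (pvMu graph node _) node _ (le_refl _) indent [] []]
    simp [pvRunB]
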